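-- pv_equiv track=rewrite | github.com/asmakhoualdia98/SU_SAT_Exec | Data/GraphRing.py | create_ring_adjacency_matrix
-- ===== SOURCE A (Python) =====
-- def create_ring_adjacency_matrix(num_nodes):
--     # Initialize a square matrix of size num_nodes x num_nodes filled with zeros
--     adjacency_matrix = [[0] * num_nodes for _ in range(num_nodes)]
--
--     # Loop through each node to define its neighbors in the ring
--     for i in range(num_nodes):
--         # Calculate the index of the left neighbor (previous node), with wrap-around
--         left = (i - 1) % num_nodes
--
--         # Calculate the index of the right neighbor (next node), with wrap-around
--         right = (i + 1) % num_nodes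
--
--         # Mark the connections in the adjacency matrix
--         adjacency_matrix[i][left] = 1
--         adjacency_matrix[i][right] = 1
--
--     return adjacency_matrix
-- ===== SOURCE B (Python) =====
-- def create_ring_adjacency_matrix(num_nodes):
--     n = num_nodes
--     if n <= 0:
--         return []
--     # circulant: one base row, every other row is a rotation of it
--     base = [0] * n
--     base[(-1) % n] = 1
--     base[1 % n] = 1
--     return [base[n - i:] + base[:n - i] for i in range(n)]
-- ===== Notes on version B (the rewrite author's own statement) =====
-- stated objective: alternative
-- what changed: B builds one circulant base row with the two neighbor marks and produces each row as a slice-rotation of it, instead of zero-initializing an n*n matrix and scatter-writing two marks per row.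
import Mathlib
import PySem

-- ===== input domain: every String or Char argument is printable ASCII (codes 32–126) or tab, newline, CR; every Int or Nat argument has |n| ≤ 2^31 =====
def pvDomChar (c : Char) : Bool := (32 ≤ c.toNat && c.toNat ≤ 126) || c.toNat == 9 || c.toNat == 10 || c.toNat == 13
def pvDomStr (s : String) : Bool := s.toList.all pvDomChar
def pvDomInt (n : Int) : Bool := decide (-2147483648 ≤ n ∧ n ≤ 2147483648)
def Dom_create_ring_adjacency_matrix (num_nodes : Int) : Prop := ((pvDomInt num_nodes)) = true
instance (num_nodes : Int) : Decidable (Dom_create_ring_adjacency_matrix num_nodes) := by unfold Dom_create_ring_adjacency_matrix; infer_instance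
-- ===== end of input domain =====

-- B builds the ring adjacency matrix as a circulant (one base row, each row a slice-rotation
-- of it) instead of zero-initializing and scatter-writing two 1s per row; alternative decomposition, same cost.

-- ===== PORT A =====
-- Python: adjacency_matrix[i][left] = 1 mutates the row list in place; here the row is read
-- (pyGetD, index always in range: 0 ≤ i < n), updated (pySetD, exact for in-range index) and
-- written back — the same observable state after each statement.
def create_ring_adjacency_matrix (num_nodes : Int) : List (List Int) :=
  let mat := (PySem.List.pyRange 0 num_nodes 1).map (fun _ => PySem.List.pyRepeat [(0 : Int)] num_nodes)
  (PySem.List.pyRange 0 num_nodes 1).foldl (fun m i =>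
    let left := PySem.Int.mod (i - 1) num_nodes
    let right := PySem.Int.mod (i + 1) num_nodes
    let m := PySem.List.pySetD m i (PySem.List.pySetD (PySem.List.pyGetD m i []) left 1)
    let m := PySem.List.pySetD m i (PySem.List.pySetD (PySem.List.pyGetD m i []) right 1)
    m) mat

-- ===== PORT B =====
def create_ring_adjacency_matrix_alt (num_nodes : Int) : List (List Int) :=
  if num_nodes ≤ 0 then []
  else
    let base := PySem.List.pyRepeat [(0 : Int)] num_nodes
    let base := PySem.List.pySetD base (PySem.Int.mod (-1) num_nodes) 1
    let base := PySem.List.pySetD base (PySem.Int.mod 1 num_nodes) 1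
    (PySem.List.pyRange 0 num_nodes 1).map (fun i =>
      PySem.List.slice base (some (num_nodes - i)) none ++
      PySem.List.slice base none (some (num_nodes - i)))

-- ===== PRECONDITION & SPEC =====
def Spec_create_ring_adjacency_matrix (num_nodes : Int) (out : List (List Int)) : Prop := out = create_ring_adjacency_matrix_alt num_nodes
instance (num_nodes : Int) (out : List (List Int)) : Decidable (Spec_create_ring_adjacency_matrix num_nodes out) := by unfold Spec_create_ring_adjacency_matrix; infer_instance

-- ===== CLAIM (what is proved, stated in full; the proofs are below) =====
def Claim_equal_create_ring_adjacency_matrix : Prop := ∀ (num_nodes : Int), Dom_create_ring_adjacency_matrix num_nodes → Spec_create_ring_adjacency_matrix num_nodes (create_ring_adjacency_matrix num_nodes)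

-- ===== LEMMAS AND PROOFS =====

-- the all-zero row
def pvZrow (m : Nat) : List Int := List.replicate m 0

-- A's finished row i, the two marks written as explicit case splits (valid for 0 < m, k < m)
def pvArow (m k : Nat) : List Int :=
  ((pvZrow m).set (if k = 0 then m - 1 else k - 1) 1).set (if k = m - 1 then 0 else k + 1) 1

-- B's base row
def pvBrow (m : Nat) : List Int :=
  ((List.replicate m (0 : Int)).set (m - 1) 1).set (if m = 1 then 0 else 1) 1

theorem pvMod_left (m K : Nat) (hm : 0 < m) (hK : K < m) :
    PySem.Int.mod ((K : Int) - 1) (m : Int) = ((if K = 0 then m - 1 else K - 1 : Nat) : Int) := by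
  rw [PySem.Int.mod_eq_emod_of_pos (by exact_mod_cast hm)]
  rcases Nat.eq_zero_or_pos K with h | h
  · subst h
    have h1 : ((0 : Nat) : Int) - 1 = ((m : Int) - 1) + (m : Int) * (-1) := by push_cast; ring
    rw [h1, Int.add_mul_emod_self_left, Int.emod_eq_of_lt (by omega) (by omega)]
    simp; omega
  · rw [Int.emod_eq_of_lt (by omega) (by omega)]
    simp [Nat.pos_iff_ne_zero.mp h]; omega

theorem pvMod_right (m K : Nat) (hm : 0 < m) (hK : K < m) :
    PySem.Int.mod ((K : Int) + 1) (m : Int) = ((if K = m - 1 then 0 else K + 1 : Nat) : Int) := by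
  rw [PySem.Int.mod_eq_emod_of_pos (by exact_mod_cast hm)]
  by_cases h : K = m - 1
  · have : ((K : Int) + 1) = (m : Int) := by omega
    rw [this, Int.emod_self]
    simp [h]
  · rw [Int.emod_eq_of_lt (by omega) (by omega)]
    simp [h]

-- A's loop body, named so the fold invariant can speak about it
def pvStep (n : Int) (m : List (List Int)) (i : Int) : List (List Int) :=
  let left := PySem.Int.mod (i - 1) n
  let right := PySem.Int.mod (i + 1) n
  let m := PySem.List.pySetD m i (PySem.List.pySetD (PySem.List.pyGetD m i []) left 1)
  let m := PySem.List.pySetD m i (PySem.List.pySetD (PySem.List.pyGetD m i []) right 1)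
  m

theorem pvStep_spec (n : Int) (hn : 0 < n) (K : Nat) (hK : K < n.toNat) :
    pvStep n ((List.range n.toNat).map (fun k => if k < K then pvArow n.toNat k else pvZrow n.toNat)) ((K : Nat) : Int)
      = (List.range n.toNat).map (fun k => if k < K + 1 then pvArow n.toNat k else pvZrow n.toNat) := by
  have hm : 0 < n.toNat := by omega
  have hcast : ((n.toNat : Nat) : Int) = n := by omega
  have hmodl := pvMod_left n.toNat K hm hK
  have hmodr := pvMod_right n.toNat K hm hK
  rw [hcast] at hmodl hmodr
  set M := (List.range n.toNat).map (fun k => if k < K then pvArow n.toNat k else pvZrow n.toNat) with hM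
  have hlen : M.length = n.toNat := by simp [hM]
  have hMK : M.getD K [] = pvZrow n.toNat := by
    rw [List.getD_eq_getElem _ _ (by omega)]
    simp [hM]
  unfold pvStep
  rw [hmodl, hmodr]
  simp only [PySem.List.pySetD_natCast, PySem.List.pyGetD_natCast, hMK]
  rw [List.getD_eq_getElem _ _ (by rw [List.length_set]; omega), List.getElem_set_self, List.set_set]
  apply List.ext_getElem
  · simp [hM]
  · intro j hj hj'
    have hjm : j < n.toNat := by simpa [hM] using hj
    rw [List.getElem_set]
    by_cases hjK : K = j
    · subst hjK
      simp [pvArow]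
    · rw [if_neg hjK]
      simp only [hM, List.getElem_map, List.getElem_range]
      by_cases h1 : j < K
      · rw [if_pos h1, if_pos (by omega)]
      · rw [if_neg h1, if_neg (by omega)]

theorem pvA_fold (n : Int) (hn : 0 < n) (K : Nat) (hK : K ≤ n.toNat) :
    ((List.range K).map (fun k => ((k : Nat) : Int))).foldl (pvStep n)
        ((List.range n.toNat).map (fun _ => pvZrow n.toNat))
      = (List.range n.toNat).map (fun k => if k < K then pvArow n.toNat k else pvZrow n.toNat) := by
  induction K with
  | zero => simp
  | succ K ih =>
    rw [List.range_succ, List.map_append, List.foldl_append, ih (by omega)]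
    simpa using pvStep_spec n hn K (by omega)

theorem pvA_eq (n : Int) (hn : 0 < n) :
    create_ring_adjacency_matrix n = (List.range n.toNat).map (fun k => pvArow n.toNat k) := by
  have h : create_ring_adjacency_matrix n
      = (PySem.List.pyRange 0 n 1).foldl (pvStep n)
          ((PySem.List.pyRange 0 n 1).map (fun _ => PySem.List.pyRepeat [(0 : Int)] n)) := rfl
  rw [h, PySem.List.pyRange_one]
  simp only [Int.sub_zero, List.map_map, Function.comp_def, zero_add, PySem.List.pyRepeat_singleton]
  rw [show (fun (_ : Nat) => List.replicate n.toNat (0 : Int)) = (fun (_ : Nat) => pvZrow n.toNat) from rfl,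
      pvA_fold n hn n.toNat le_rfl]
  exact List.map_congr_left (fun k hk => by rw [if_pos (List.mem_range.mp hk)])

theorem pvB_eq (n : Int) (hn : 0 < n) :
    create_ring_adjacency_matrix_alt n
      = (List.range n.toNat).map
          (fun k => (pvBrow n.toNat).drop (n.toNat - k) ++ (pvBrow n.toNat).take (n.toNat - k)) := by
  have hm : 0 < n.toNat := by omega
  have hcast : ((n.toNat : Nat) : Int) = n := by omega
  have hmodl : PySem.Int.mod (-1) n = ((n.toNat - 1 : Nat) : Int) := by
    have h := pvMod_left n.toNat 0 hm hm
    rw [hcast] at h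
    simpa using h
  have hmodr : PySem.Int.mod 1 n = ((if n.toNat = 1 then 0 else 1 : Nat) : Int) := by
    have h := pvMod_right n.toNat 0 hm hm
    rw [hcast] at h
    have he : (if 0 = n.toNat - 1 then (0 : Nat) else 0 + 1) = (if n.toNat = 1 then 0 else 1) := by
      split_ifs <;> omega
    simpa [he] using h
  have hbase : PySem.List.pySetD
      (PySem.List.pySetD (PySem.List.pyRepeat [(0 : Int)] n) (PySem.Int.mod (-1) n) 1)
      (PySem.Int.mod 1 n) 1 = pvBrow n.toNat := by
    rw [hmodl, hmodr, PySem.List.pyRepeat_singleton,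
       PySem.List.pySetD_natCast, PySem.List.pySetD_natCast]
    rfl
  unfold create_ring_adjacency_matrix_alt
  rw [if_neg (by omega)]
  simp only [hbase]
  rw [PySem.List.pyRange_one]
  simp only [Int.sub_zero, List.map_map]
  refine List.map_congr_left (fun k hk => ?_)
  have hk' : k < n.toNat := List.mem_range.mp hk
  simp only [Function.comp]
  rw [show (0 : Int) + (k : Int) = ((k : Nat) : Int) by ring]
  have h1 := PySem.List.slice_from (xs := pvBrow n.toNat) (a := n - (k : Int)) (by omega)
  have h2 := PySem.List.slice_to (xs := pvBrow n.toNat) (b := n - (k : Int)) (by omega)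
  have h3 : (n - (k : Int)).toNat = n.toNat - k := by omega
  rw [h1, h2, h3]

theorem pvBrow_length (m : Nat) : (pvBrow m).length = m := by
  simp [pvBrow]

theorem pvRow_eq (m k : Nat) (hm : 0 < m) (hk : k < m) :
    pvArow m k = (pvBrow m).drop (m - k) ++ (pvBrow m).take (m - k) := by
  apply List.ext_getElem
  · simp [pvArow, pvZrow, pvBrow]
  · intro j hj hj'
    have hjm : j < m := by simpa [pvArow, pvZrow] using hj
    rw [List.getElem_append]
    simp only [List.length_drop, pvBrow_length]
    by_cases hcase : j < m - (m - k)
    · rw [dif_pos hcase, List.getElem_drop]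
      simp only [pvArow, pvZrow, pvBrow, List.getElem_set, List.getElem_replicate]
      split_ifs <;> omega
    · rw [dif_neg hcase, List.getElem_take]
      simp only [pvArow, pvZrow, pvBrow, List.getElem_set, List.getElem_replicate]
      split_ifs <;> omega

-- ===== VERDICT (by name: the statement is the Claim_ definition above) =====
theorem create_ring_adjacency_matrix_spec : Claim_equal_create_ring_adjacency_matrix := by
  intro n _
  unfold Spec_create_ring_adjacency_matrix
  by_cases hn : n ≤ 0
  · simp [create_ring_adjacency_matrix, create_ring_adjacency_matrix_alt, hn]
  · have hn' : 0 < n := by omega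
    rw [pvA_eq n hn', pvB_eq n hn']
    refine List.map_congr_left (fun k hk => ?_)
    exact pvRow_eq n.toNat k (by omega) (List.mem_range.mp hk)
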